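-- pv_equiv track=rewrite | github.com/HITOfficial/College | ASD/Kolokwia/zad3.py | last_or_greater
-- ===== SOURCE A (Python) =====
-- def last_or_greater(Arr,k):
--     i = 1
--     while Arr[i] is not None and Arr[i] < k:
--         i *= 2 # idę o 2x dalej przy kazdej iteracji
--     if Arr[i] is None: # przeskoczyłem za index -> # cofam sie do ostaniego elementu
--         while Arr[i] is None:
--             i -= 1
--     return i
-- ===== SOURCE B (Python) =====
-- def last_or_greater(Arr, k):
--     def probe(p):
--         v = Arr[p]
--         return probe(2 * p) if v is not None and v < k else p
--
--     p = probe(1)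
--     if Arr[p] is not None:
--         return p
--     return max(j for j in range(p) if Arr[j] is not None)
-- ===== Notes on version B (the rewrite author's own statement) =====
-- stated objective: alternative
-- what changed: The iterative doubling loop becomes a recursive probe, and the downward early-exit backtrack over None entries is replaced by a forward max() over the non-None indices below the stop point.
-- outside the precondition, e.g. on last_or_greater([None, None, 5], 3): A returns -1, B raises ValueError
import Mathlib
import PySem

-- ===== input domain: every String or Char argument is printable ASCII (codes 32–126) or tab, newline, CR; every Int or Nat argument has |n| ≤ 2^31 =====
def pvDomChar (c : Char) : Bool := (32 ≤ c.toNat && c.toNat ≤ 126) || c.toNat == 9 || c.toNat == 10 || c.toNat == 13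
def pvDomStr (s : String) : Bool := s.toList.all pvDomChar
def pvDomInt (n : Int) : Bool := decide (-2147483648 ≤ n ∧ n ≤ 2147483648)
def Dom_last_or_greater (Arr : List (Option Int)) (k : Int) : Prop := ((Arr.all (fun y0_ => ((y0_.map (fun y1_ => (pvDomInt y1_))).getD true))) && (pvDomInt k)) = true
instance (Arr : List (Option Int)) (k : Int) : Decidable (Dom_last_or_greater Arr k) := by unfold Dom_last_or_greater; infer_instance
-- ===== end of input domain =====

-- B replaces A's iterative doubling loop by a recursive probe and A's downward early-exit
-- backtrack by a forward max() over the non-None indices below the stop point (alternative,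
-- same asymptotic cost).

-- ===== PORT A =====
-- while Arr[i] is not None and Arr[i] < k: i *= 2
-- (fuel-bounded: i doubles from 1, so Arr.length + 1 steps always reach the exit or the
--  IndexError; on the IndexError path — pyGet? = none, excluded by Pre_ — it returns i as junk)
def pvALoop (Arr : List (Option Int)) (k : Int) : Nat → Int → Int
  | 0, i => i
  | fuel + 1, i =>
    match PySem.List.pyGet? Arr i with
    | some (some v) => if v < k then pvALoop Arr k fuel (i * 2) else i
    | _ => i

-- while Arr[i] is None: i -= 1   (junk i on the IndexError path, excluded by Pre_)
def pvABack (Arr : List (Option Int)) : Nat → Int → Int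
  | 0, i => i
  | fuel + 1, i =>
    match PySem.List.pyGet? Arr i with
    | some none => pvABack Arr fuel (i - 1)
    | _ => i

def last_or_greater (Arr : List (Option Int)) (k : Int) : Int :=
  let i := pvALoop Arr k (Arr.length + 1) 1
  match PySem.List.pyGet? Arr i with
  | some none => pvABack Arr (2 * Arr.length + 2) i   -- if Arr[i] is None: backtrack
  | _ => i

-- ===== PORT B =====
-- def probe(p): v = Arr[p]; return probe(2*p) if v is not None and v < k else p
-- (fuel-bounded exactly like A's loop; junk p on the IndexError path, excluded by Pre_)
def pvBProbe (Arr : List (Option Int)) (k : Int) : Nat → Int → Int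
  | 0, p => p
  | fuel + 1, p =>
    match PySem.List.pyGet? Arr p with
    | some (some v) => if v < k then pvBProbe Arr k fuel (2 * p) else p
    | _ => p

-- Arr[j] is not None  (for the generator's filter)
def pvNonNone (Arr : List (Option Int)) (j : Int) : Bool :=
  match PySem.List.pyGet? Arr j with
  | some (some _) => true
  | _ => false

def last_or_greater_alt (Arr : List (Option Int)) (k : Int) : Int :=
  let p := pvBProbe Arr k (Arr.length + 1) 1
  match PySem.List.pyGet? Arr p with
  | some (some _) => p        -- if Arr[p] is not None: return p
  | _ =>                      -- max(j for j in range(p) if Arr[j] is not None)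
    match PySem.List.max? ((PySem.List.pyRange 0 p 1).filter (fun j => pvNonNone Arr j)) (fun x => x) with
    | some m => m
    | none => 0               -- empty generator: Python raises ValueError (excluded by Pre_)

-- ===== PRECONDITION & SPEC =====
-- Python's loop exit test at index p: Arr[p] is None or Arr[p] >= k (false on IndexError)
def pvStops (Arr : List (Option Int)) (k : Int) (p : Int) : Bool :=
  match PySem.List.pyGet? Arr p with
  | some none => true
  | some (some v) => decide (k ≤ v)
  | none => false

-- Pre_ excludes (a) inputs where the doubling probe runs past the end — A raises IndexError —
-- i.e. no power of two below len(Arr) passes the exit test, and (b) inputs with Arr[0] and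
-- Arr[1] both None, where A's backtrack wraps to negative indices (returning a negative index
-- or raising) while B's max() over an empty sequence raises ValueError.
def Pre_last_or_greater (Arr : List (Option Int)) (k : Int) : Prop :=
  ((List.range Arr.length).any (fun m => pvStops Arr k (2 ^ m))) = true ∧
  ¬ (PySem.List.pyGet? Arr 0 = some none ∧ PySem.List.pyGet? Arr 1 = some none)

instance (Arr : List (Option Int)) (k : Int) : Decidable (Pre_last_or_greater Arr k) := by
  unfold Pre_last_or_greater; infer_instance

def pvWitness_last_or_greater : List (Option Int) × Int := ([some 1, some 2, some 5, none], 3)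

def Spec_last_or_greater (Arr : List (Option Int)) (k : Int) (out : Int) : Prop := out = last_or_greater_alt Arr k
instance (Arr : List (Option Int)) (k : Int) (out : Int) : Decidable (Spec_last_or_greater Arr k out) := by unfold Spec_last_or_greater; infer_instance

-- ===== CLAIM (what is proved, stated in full; the proofs are below) =====
def Claim_equal_last_or_greater : Prop := ∀ (Arr : List (Option Int)) (k : Int), Dom_last_or_greater Arr k → Pre_last_or_greater Arr k → Spec_last_or_greater Arr k (last_or_greater Arr k)

-- ===== LEMMAS AND PROOFS =====

-- The two probe recursions compute the same index.
theorem pvProbe_eq (Arr : List (Option Int)) (k : Int) :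
    ∀ (fuel : Nat) (i : Int), pvALoop Arr k fuel i = pvBProbe Arr k fuel i := by
  intro fuel
  induction fuel with
  | zero => intro i; rfl
  | succ f ih =>
    intro i
    simp only [pvALoop, pvBProbe]
    cases h : PySem.List.pyGet? Arr i with
    | none => rfl
    | some o =>
      cases o with
      | none => rfl
      | some v =>
        by_cases hv : v < k
        · simp [hv, ih, mul_comm]
        · simp [hv]

-- pyGet? at a nonnegative out-of-range index stays none further right.
theorem pvGet_none_mono (Arr : List (Option Int)) {i j : Int} (hi : 0 ≤ i)
    (h : PySem.List.pyGet? Arr i = none) (hij : i ≤ j) :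
    PySem.List.pyGet? Arr j = none := by
  rw [PySem.List.pyGet?_eq_none_iff] at h ⊢
  unfold PySem.Raise.InRange at h ⊢
  omega

-- pyGet? = some means the (nonnegative) index is below the length.
theorem pvGet_some_lt (Arr : List (Option Int)) {i : Int} {x : Option Int}
    (h : PySem.List.pyGet? Arr i = some x) : i < Arr.length := by
  by_contra hlt
  rw [show PySem.List.pyGet? Arr i = none from by
        rw [PySem.List.pyGet?_eq_none_iff]; unfold PySem.Raise.InRange; omega] at h
  simp at h

-- Correctness of the doubling loop: if some power of two within fuel passes the exit test,
-- the loop stops at an index r ≥ i where the exit test holds, and either r = i or some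
-- strictly smaller nonnegative index holds a value.
theorem pvLoop_ok (Arr : List (Option Int)) (k : Int) :
    ∀ (fuel : Nat) (i : Int), 0 < i →
    (∃ m : Nat, m < fuel ∧ pvStops Arr k (i * 2 ^ m) = true) →
    pvStops Arr k (pvALoop Arr k fuel i) = true ∧ i ≤ pvALoop Arr k fuel i ∧
    (pvALoop Arr k fuel i = i ∨
      ∃ j : Int, 0 ≤ j ∧ j < pvALoop Arr k fuel i ∧ pvNonNone Arr j = true) := by
  intro fuel
  induction fuel with
  | zero => intro i _ ⟨m, hm, _⟩; omega
  | succ f ih =>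
    intro i hi ⟨m, hm, hstop⟩
    simp only [pvALoop]
    cases h : PySem.List.pyGet? Arr i with
    | none =>
      -- Arr[i] raises, so every i * 2^m is out of range: contradiction with hstop.
      exfalso
      have h2 : PySem.List.pyGet? Arr (i * 2 ^ m) = none := by
        refine pvGet_none_mono Arr (by omega) h ?_
        have h2m : (0 : Int) < 2 ^ m := by positivity
        nlinarith
      rw [pvStops, h2] at hstop
      exact Bool.noConfusion hstop
    | some o =>
      cases o with
      | none =>
        refine ⟨?_, le_refl i, Or.inl rfl⟩
        rw [pvStops, h]
      | some v =>
        by_cases hv : v < k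
        · simp only [hv, if_true]
          have hm0 : m ≠ 0 := by
            intro h0
            rw [h0] at hstop
            simp only [pow_zero, mul_one, pvStops, h] at hstop
            have : k ≤ v := of_decide_eq_true hstop
            omega
          obtain ⟨m', rfl⟩ : ∃ m', m = m' + 1 := ⟨m - 1, by omega⟩
          have hrec := ih (i * 2) (by omega)
            ⟨m', by omega, by rw [show i * 2 * 2 ^ m' = i * 2 ^ (m' + 1) by ring]; exact hstop⟩
          refine ⟨hrec.1, by omega, ?_⟩
          rcases hrec.2.2 with heq | ⟨j, hj⟩
          · right
            exact ⟨i, by omega, by rw [heq]; omega, by rw [pvNonNone, h]⟩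
          · right; exact ⟨j, hj⟩
        · simp only [hv, if_false]
          refine ⟨?_, le_refl i, Or.inl (by trivial)⟩
          rw [pvStops, h]
          simpa using (by omega : k ≤ v)

-- The strictly greatest element appended at the end is the max.
theorem pvMax_append (l : List Int) (i : Int) (hl : ∀ x ∈ l, x < i) :
    PySem.List.max? (l ++ [i]) (fun x => x) = some i := by
  cases hmx : PySem.List.max? (l ++ [i]) (fun x => x) with
  | none =>
    rw [PySem.List.max?_eq_none_iff] at hmx
    exact absurd hmx (by simp)
  | some m =>
    have hmem : m ∈ l ++ [i] := PySem.List.max?_mem hmx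
    have hmax : i ≤ m := PySem.List.max?_isMax hmx i (by simp)
    rcases List.mem_append.mp hmem with hml | hmi
    · exact absurd (hl m hml) (by omega)
    · simp_all

-- B's aggregate: max over the non-None indices in range(m).
def pvFMax (Arr : List (Option Int)) (m : Int) : Int :=
  match PySem.List.max? ((PySem.List.pyRange 0 m 1).filter (fun j => pvNonNone Arr j)) (fun x => x) with
  | some x => x
  | none => 0

-- A filtered-out right endpoint extends the range without changing the aggregate.
theorem pvFMax_succ_none (Arr : List (Option Int)) (i : Int) (hi : 0 ≤ i)
    (h : pvNonNone Arr i = false) : pvFMax Arr (i + 1) = pvFMax Arr i := by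
  unfold pvFMax
  rw [PySem.List.pyRange_one_succ_right hi, List.filter_append]
  simp [h]

-- The backtrack loop computes B's forward max, given a value somewhere at or below i.
theorem pvBack_ok (Arr : List (Option Int)) :
    ∀ (fuel : Nat) (i : Int), 0 ≤ i → i < Arr.length →
    (∃ j : Int, 0 ≤ j ∧ j ≤ i ∧ pvNonNone Arr j = true) →
    i.toNat < fuel →
    pvABack Arr fuel i = pvFMax Arr (i + 1) := by
  intro fuel
  induction fuel with
  | zero => intro i _ _ _ hf; omega
  | succ f ih =>
    intro i hi hilen ⟨j, hj0, hji, hjval⟩ hfuel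
    simp only [pvABack]
    cases hget : PySem.List.pyGet? Arr i with
    | none =>
      exfalso
      rw [PySem.List.pyGet?_eq_none_iff] at hget
      unfold PySem.Raise.InRange at hget
      omega
    | some o =>
      cases o with
      | some v =>
        -- Arr[i] holds a value: the loop returns i, and i is the max of the filtered range.
        have hpi : pvNonNone Arr i = true := by rw [pvNonNone, hget]
        unfold pvFMax
        rw [PySem.List.pyRange_one_succ_right hi, List.filter_append]
        simp only [List.filter_singleton, hpi, cond_true]
        rw [pvMax_append _ i (by
          intro x hx'
          have := PySem.List.mem_pyRange_one.mp (List.mem_of_mem_filter hx')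
          omega)]
      | none =>
        -- Arr[i] is None: recurse at i - 1; the filtered range is unchanged.
        have hpi : pvNonNone Arr i = false := by rw [pvNonNone, hget]
        have hjne : j ≠ i := by intro he; rw [he, hpi] at hjval; exact Bool.noConfusion hjval
        have h1 : pvABack Arr f (i - 1) = pvFMax Arr (i - 1 + 1) :=
          ih (i - 1) (by omega) (by omega) ⟨j, hj0, by omega, hjval⟩ (by omega)
        rw [h1, show i - 1 + 1 = i by ring, pvFMax_succ_none Arr i hi hpi]

-- ===== VERDICT (by name: the statement is the Claim_ definition above) =====
theorem last_or_greater_spec : Claim_equal_last_or_greater := by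
  intro Arr k _ hPre
  obtain ⟨hstop, hwrap⟩ := hPre
  rw [List.any_eq_true] at hstop
  obtain ⟨m, hmmem, hms⟩ := hstop
  rw [List.mem_range] at hmmem
  -- the probe's result r, shared by both ports
  have hloop := pvLoop_ok Arr k (Arr.length + 1) 1 (by omega)
    ⟨m, by omega, by rwa [one_mul]⟩
  set r := pvALoop Arr k (Arr.length + 1) 1 with hr
  obtain ⟨hrs, hr1, hror⟩ := hloop
  unfold Spec_last_or_greater last_or_greater last_or_greater_alt
  rw [← pvProbe_eq Arr k, ← hr]
  -- the exit test holds at r: Arr[r] is either None or a value ≥ k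
  rw [pvStops] at hrs
  cases hget : PySem.List.pyGet? Arr r with
  | none => rw [hget] at hrs; exact Bool.noConfusion hrs
  | some o =>
    cases o with
    | some v => simp only [hget]
    | none =>
      simp only [hget]
      have hrlen : r < Arr.length := pvGet_some_lt Arr hget
      -- a value exists at some index ≤ r
      have hex : ∃ j : Int, 0 ≤ j ∧ j ≤ r ∧ pvNonNone Arr j = true := by
        rcases hror with heq | ⟨j, hj0, hjr, hjval⟩
        · -- r = 1: Arr[1] is None, so by Pre_ Arr[0] is not None
          have h1 : PySem.List.pyGet? Arr 1 = some none := by rwa [← heq]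
          have h0 : PySem.List.pyGet? Arr 0 ≠ none := by
            intro hn
            rw [PySem.List.pyGet?_eq_none_iff] at hn
            unfold PySem.Raise.InRange at hn
            omega
          obtain ⟨x, hx⟩ := Option.ne_none_iff_exists'.mp h0
          cases x with
          | none => exact absurd ⟨hx, h1⟩ hwrap
          | some v0 => exact ⟨0, le_refl 0, by omega, by rw [pvNonNone, hx]⟩
        · exact ⟨j, hj0, by omega, hjval⟩
      rw [pvBack_ok Arr (2 * Arr.length + 2) r (by omega) hrlen hex (by omega),
        pvFMax_succ_none Arr r (by omega) (by rw [pvNonNone, hget])]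
      -- B's range(r) equals the backtrack's range(r + 1) since Arr[r] is None
      rfl
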